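-- pv_equiv track=rewrite | github.com/Thuler14/njit-ece-416-project | tests/scripts/m2_logger_plot.py | _spans_from_indices
-- ===== SOURCE A (Python) =====
-- def _spans_from_indices(idxs):
--   """Return inclusive index spans for contiguous ranges."""
--   spans = []
--   if len(idxs) == 0:
--     return spans
--
--   start = prev = idxs[0]
--   for idx in idxs[1:]:
--     if idx == prev + 1:
--       prev = idx
--       continue
--     spans.append((start, prev))
--     start = prev = idx
--   spans.append((start, prev))
--   return spans
-- ===== SOURCE B (Python) =====
-- from itertools import groupby
--
--
-- def _spans_from_indices(idxs):
--   """Return inclusive index spans for contiguous ranges."""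
--   spans = []
--   for _, grp in groupby(enumerate(idxs), key=lambda t: t[1] - t[0]):
--     grp = list(grp)
--     spans.append((grp[0][1], grp[-1][1]))
--   return spans
-- ===== Notes on version B (the rewrite author's own statement) =====
-- stated objective: idiomatic
-- what changed: Replaced the explicit start/prev state machine with itertools.groupby over enumerate(idxs) keyed by v - i, mapping each run to (first value, last value).
import Mathlib
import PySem

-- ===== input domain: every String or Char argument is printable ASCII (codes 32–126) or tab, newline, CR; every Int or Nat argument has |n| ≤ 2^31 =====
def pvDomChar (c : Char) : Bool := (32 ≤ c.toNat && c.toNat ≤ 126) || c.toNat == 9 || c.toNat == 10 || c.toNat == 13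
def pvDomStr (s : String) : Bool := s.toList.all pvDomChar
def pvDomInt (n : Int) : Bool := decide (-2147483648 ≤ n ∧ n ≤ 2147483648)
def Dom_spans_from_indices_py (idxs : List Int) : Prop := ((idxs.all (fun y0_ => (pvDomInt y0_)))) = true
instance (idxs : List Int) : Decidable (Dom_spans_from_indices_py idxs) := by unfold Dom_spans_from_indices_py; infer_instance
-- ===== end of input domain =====

-- B replaces A's start/prev state machine with a groupby-over-enumerate decomposition
-- (key v - i constant across a consecutive run), mapping each run to (first, last): more idiomatic.


-- ===== PORT A =====
-- A's for-loop over idxs[1:] with state (spans, start, prev)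
def loopA : List Int → List (Int × Int) → Int → Int → List (Int × Int)
  | [], spans, start, prev => spans ++ [(start, prev)]
  | idx :: rest, spans, start, prev =>
    if idx = prev + 1 then loopA rest spans start idx
    else loopA rest (spans ++ [(start, prev)]) idx idx

def spans_from_indices_py (idxs : List Int) : List (Int × Int) :=
  match idxs with
  | [] => []
  | x :: rest => loopA rest [] x x

-- ===== PORT B =====
-- enumerate(idxs) starting at n (B uses n = 0)
def enumFrom : Int → List Int → List (Int × Int)
  | _, [] => []
  | n, x :: xs => (n, x) :: enumFrom (n + 1) xs

-- groupby(…, key=λ (i,v), v - i): runs of pairs with equal key, each run as (head, tail)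
def runsB : List (Int × Int) → List ((Int × Int) × List (Int × Int))
  | [] => []
  | p :: rest =>
    match runsB rest with
    | [] => [(p, [])]
    | (q, qs) :: more =>
      if p.2 - p.1 = q.2 - q.1 then (p, q :: qs) :: more
      else (p, []) :: (q, qs) :: more

-- grp[-1][1]: value of the last pair of a nonempty run
def lastVal : (Int × Int) → List (Int × Int) → Int
  | h, [] => h.2
  | _, q :: qs => lastVal q qs

-- each run ↦ (grp[0][1], grp[-1][1])
def mapRuns (rs : List ((Int × Int) × List (Int × Int))) : List (Int × Int) :=
  rs.map (fun r => (r.1.2, lastVal r.1 r.2))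

def spans_from_indices_py_alt (idxs : List Int) : List (Int × Int) :=
  mapRuns (runsB (enumFrom 0 idxs))

-- ===== PRECONDITION & SPEC =====
def Spec_spans_from_indices_py (idxs : List Int) (out : List (Int × Int)) : Prop := out = spans_from_indices_py_alt idxs
instance (idxs : List Int) (out : List (Int × Int)) : Decidable (Spec_spans_from_indices_py idxs out) := by unfold Spec_spans_from_indices_py; infer_instance

-- ===== CLAIM (what is proved, stated in full; the proofs are below) =====
def Claim_equal_spans_from_indices_py : Prop := ∀ (idxs : List Int), Dom_spans_from_indices_py idxs → Spec_spans_from_indices_py idxs (spans_from_indices_py idxs)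

-- ===== LEMMAS AND PROOFS =====

-- replace the first component of the first pair (proof-only helper)
def replFst (a : Int) : List (Int × Int) → List (Int × Int)
  | [] => []
  | (_, b) :: t => (a, b) :: t

theorem loopA_acc (rest : List Int) (spans : List (Int × Int)) (start prev : Int) :
    loopA rest spans start prev = spans ++ loopA rest [] start prev := by
  induction rest generalizing spans start prev with
  | nil => simp [loopA]
  | cons idx rest' ih =>
    simp only [loopA]
    split
    · rw [ih spans, ih []]
    · rw [ih (spans ++ [(start, prev)]), ih ([] ++ [(start, prev)])]
      simp

theorem runsB_cons (p : Int × Int) (l : List (Int × Int)) :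
    ∃ t more, runsB (p :: l) = (p, t) :: more := by
  simp only [runsB]
  cases h : runsB l with
  | nil => exact ⟨[], [], rfl⟩
  | cons r more =>
    obtain ⟨q, qs⟩ := r
    by_cases hk : p.2 - p.1 = q.2 - q.1
    · exact ⟨q :: qs, more, by simp [hk]⟩
    · exact ⟨[], (q, qs) :: more, by simp [hk]⟩

theorem runsB_cons_eq (p q : Int × Int) (qs : List (Int × Int))
    (more : List ((Int × Int) × List (Int × Int))) (l : List (Int × Int))
    (h : runsB l = (q, qs) :: more) :
    runsB (p :: l) =
      if p.2 - p.1 = q.2 - q.1 then (p, q :: qs) :: more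
      else (p, []) :: (q, qs) :: more := by
  simp only [runsB, h]

theorem loopA_runs (rest : List Int) (n start prev : Int) :
    loopA rest [] start prev = replFst start (mapRuns (runsB (enumFrom n (prev :: rest)))) := by
  induction rest generalizing n start prev with
  | nil => simp [loopA, enumFrom, runsB, mapRuns, lastVal, replFst]
  | cons idx rest' ih =>
    obtain ⟨t, more, ht⟩ := runsB_cons ((n + 1 : Int), idx) (enumFrom (n + 1 + 1) rest')
    have henum : enumFrom n (prev :: idx :: rest')
        = (n, prev) :: (n + 1, idx) :: enumFrom (n + 1 + 1) rest' := by
      simp [enumFrom]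
    have henum2 : enumFrom (n + 1) (idx :: rest') = (n + 1, idx) :: enumFrom (n + 1 + 1) rest' := by
      simp [enumFrom]
    rw [henum, runsB_cons_eq _ _ _ _ _ ht]
    by_cases hc : idx = prev + 1
    · have hkey : prev - n = idx - (n + 1) := by omega
      have h1 : loopA (idx :: rest') [] start prev = loopA rest' [] start idx := by
        simp [loopA, hc]
      rw [h1, ih (n + 1) start idx, henum2, ht]
      simp [hkey, mapRuns, replFst, lastVal]
    · have hkey : ¬ ((prev : Int) - n = idx - (n + 1)) := by omega
      have h1 : loopA (idx :: rest') [] start prev = (start, prev) :: loopA rest' [] idx idx := by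
        simp only [loopA, if_neg hc]
        rw [loopA_acc]
        simp
      rw [h1, ih (n + 1) idx idx, henum2, ht]
      simp [hkey, mapRuns, replFst, lastVal]

-- ===== VERDICT (by name: the statement is the Claim_ definition above) =====
theorem spans_from_indices_py_spec : Claim_equal_spans_from_indices_py := by
  intro idxs _
  unfold Spec_spans_from_indices_py spans_from_indices_py_alt
  cases idxs with
  | nil => simp [spans_from_indices_py, enumFrom, runsB, mapRuns]
  | cons x rest =>
    obtain ⟨t, more, ht⟩ := runsB_cons ((0 : Int), x) (enumFrom 1 rest)
    show loopA rest [] x x = _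
    rw [loopA_runs rest 0 x x]
    have h0 : enumFrom 0 (x :: rest) = (0, x) :: enumFrom 1 rest := by norm_num [enumFrom]
    rw [h0, ht]
    simp [mapRuns, replFst]
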